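-- pv_equiv track=rewrite | github.com/raim95/time_manager | defs.py | only_time_in_message
-- ===== SOURCE A (Python) =====
-- def only_time_in_message(time_1):
--     if len(time_1) == 3 or len(time_1) == 7:
--         time_1.insert(0, '0')
--     if len(time_1) == 4:
--         time_1[0] = str(time_1[0]) + str(time_1[1])
--         time_1[1] = str(time_1[2]) + str(time_1[3])
--         time_1.pop(3)
--         time_1.pop(2)
--     elif len(time_1) == 8:
--         time_1[0] = str(time_1[0]) + str(time_1[1])
--         time_1[1] = str(time_1[2]) + str(time_1[3])
--         time_1[2] = str(time_1[4]) + str(time_1[5])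
--         time_1[3] = str(time_1[6]) + str(time_1[7])
--         for i in range(4):
--             time_1.pop(4)
--     return time_1
-- ===== SOURCE B (Python) =====
-- def only_time_in_message(time_1):
--     n = len(time_1)
--     if n == 3 or n == 7:
--         time_1.insert(0, '0')
--         n += 1
--     if n != 4 and n != 8:
--         return time_1
--     out = []
--     pending = None
--     for x in time_1:
--         if pending is None:
--             pending = str(x)
--         else:
--             out.append(pending + str(x))
--             pending = None
--     time_1[:] = out
--     return time_1
-- ===== Notes on version B (the rewrite author's own statement) =====
-- stated objective: alternative
-- what changed: Replaces A's hardcoded index assignments and pop sequences for lengths 4 and 8 with a single streaming fold over the elements that keeps a pending carry and emits one merged string per filled pair, never indexing or popping.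
import Mathlib
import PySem

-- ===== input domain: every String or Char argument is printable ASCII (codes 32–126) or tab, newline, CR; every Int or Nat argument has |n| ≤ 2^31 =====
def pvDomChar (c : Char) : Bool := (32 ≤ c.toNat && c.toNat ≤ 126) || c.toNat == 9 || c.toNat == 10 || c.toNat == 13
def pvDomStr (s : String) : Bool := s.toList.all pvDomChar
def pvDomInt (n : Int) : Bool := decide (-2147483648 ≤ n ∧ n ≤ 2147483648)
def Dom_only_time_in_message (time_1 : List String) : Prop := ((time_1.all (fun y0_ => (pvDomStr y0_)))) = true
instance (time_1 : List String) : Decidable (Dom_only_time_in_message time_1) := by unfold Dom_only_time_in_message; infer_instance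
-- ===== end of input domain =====

-- B replaces A's unrolled index/pop blocks with one streaming fold carrying a pending element (alternative decomposition); equivalence is about the returned value (both mutate the argument in place).


-- ===== PORT A =====
def only_time_in_message (time_1 : List String) : List String :=
  -- if len == 3 or len == 7: time_1.insert(0, '0')
  let t := if time_1.length = 3 ∨ time_1.length = 7 then "0" :: time_1 else time_1
  if t.length = 4 then
    -- t[0] = t[0]+t[1]; t[1] = t[2]+t[3]; pop(3); pop(2)
    match t with
    | [a, b, c, d] => [a ++ b, c ++ d]
    | _ => t
  else if t.length = 8 then
    -- four pairwise assignments, then pop(4) four times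
    match t with
    | [a, b, c, d, e, f, g, h] => [a ++ b, c ++ d, e ++ f, g ++ h]
    | _ => t
  else t

-- ===== PORT B =====
-- streaming fold: state = (emitted pairs, pending carry); emits pending ++ x whenever the carry is full
def only_time_in_message_alt (time_1 : List String) : List String :=
  let t := if time_1.length = 3 ∨ time_1.length = 7 then "0" :: time_1 else time_1
  if t.length ≠ 4 ∧ t.length ≠ 8 then t
  else
    (t.foldl (fun (st : List String × Option String) x =>
      match st.2 with
      | none => (st.1, some x)
      | some p => (st.1 ++ [p ++ x], none)) ([], none)).1

-- ===== PRECONDITION & SPEC =====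
def Spec_only_time_in_message (time_1 : List String) (out : List String) : Prop := out = only_time_in_message_alt time_1
instance (time_1 : List String) (out : List String) : Decidable (Spec_only_time_in_message time_1 out) := by unfold Spec_only_time_in_message; infer_instance

-- ===== CLAIM =====
def Claim_equal_only_time_in_message : Prop := ∀ (time_1 : List String), Dom_only_time_in_message time_1 → Spec_only_time_in_message time_1 (only_time_in_message time_1)

-- ===== LEMMAS AND PROOFS =====

-- ===== VERDICT =====
theorem only_time_in_message_spec : Claim_equal_only_time_in_message := by
  intro time_1 _
  unfold Spec_only_time_in_message only_time_in_message only_time_in_message_alt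
  generalize (if time_1.length = 3 ∨ time_1.length = 7 then "0" :: time_1 else time_1) = t
  rcases t with _ | ⟨a, _ | ⟨b, _ | ⟨c, _ | ⟨d, _ | ⟨e, _ | ⟨f, _ | ⟨g, _ | ⟨h, _ | ⟨i, rest⟩⟩⟩⟩⟩⟩⟩⟩⟩ <;>
    simp [List.foldl, List.length]
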